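-- pv_equiv track=rewrite | github.com/thirdcaptain/scratch | grid3.py | illumination
-- ===== SOURCE A (Python) =====
-- def grid_check(n, lamp):
--     if lamp[0] > n or lamp[1] > n:
--         return False
--     elif lamp[0] < 1 or lamp[1] < 1:
--         return False
--     else:
--         return True
--
-- def diagonal(item, lamp):
--     if abs(item[0] - lamp[0]) == abs(item[1] - lamp[1]):
--         return True
--     else:
--         return False
--
-- def row_cols(item, lamp):
--     if item[0] == lamp[0]:
--         return True
--     if item[1] == lamp[1]:
--         return True
--     else:
--         return False
--
-- def adjacent(coord_list, query):
--     new_list = []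
--     for coord in coord_list:
--         if coord[0] == (query[0] - 1) and coord[1] == (query[1] - 1):
--             continue
--         if coord[0] == (query[0] - 1) and coord[1] == (query[1]):
--             continue
--         if coord[0] == (query[0] - 1) and coord[1] == (query[1] + 1):
--             continue
--         if coord[0] == (query[0]) and coord[1] == (query[1] - 1):
--             continue
--         if coord[0] == (query[0]) and coord[1] == (query[1]):
--             continue
--         if coord[0] == (query[0]) and coord[1] == (query[1] + 1):
--             continue
--         if coord[0] == (query[0] + 1) and coord[1] == (query[1] - 1):
--             continue
--         if coord[0] == (query[0] + 1) and coord[1] == (query[1]):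
--             continue
--         if coord[0] == (query[0] + 1) and coord[1] == (query[1] + 1):
--             continue
--         new_list.append(coord)
--     return new_list
--
-- def illumination(size, queries, coordinate):
--     lux = []
--     for query in queries:
--         coord_list = coordinate
--         flag = False
--         if grid_check(size, query) is False:
--             lux.append(False)
--             continue
--         coord_list = adjacent(coordinate, query)
--         for item in coord_list:
--             if diagonal(item, query) is True or row_cols(item, query) is True:
--                 flag = True
--                 break
--         if flag == True:
--             lux.append(True)
--         else:
--             lux.append(False)
--     return lux
-- ===== SOURCE B (Python) =====
-- def illumination(size, queries, coordinate):
--     # Precompute line counters and a cell multiset once, then answer each query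
--     # by inclusion-exclusion over the 9 neighborhood cells
--     rows = {}
--     cols = {}
--     diags = {}
--     antis = {}
--     cells = {}
--     for c in coordinate:
--         x, y = c[0], c[1]
--         rows[x] = rows.get(x, 0) + 1
--         cols[y] = cols.get(y, 0) + 1
--         diags[x - y] = diags.get(x - y, 0) + 1
--         antis[x + y] = antis.get(x + y, 0) + 1
--         cells[(x, y)] = cells.get((x, y), 0) + 1
--     lux = []
--     for q in queries:
--         x, y = q[0], q[1]
--         if not (1 <= x <= size and 1 <= y <= size):
--             lux.append(False)
--             continue
--         total = rows.get(x, 0) + cols.get(y, 0) + diags.get(x - y, 0) + antis.get(x + y, 0)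
--         total -= 4 * cells.get((x, y), 0)
--         for dx in (-1, 0, 1):
--             for dy in (-1, 0, 1):
--                 if dx != 0 or dy != 0:
--                     total -= cells.get((x + dx, y + dy), 0)
--         lux.append(total > 0)
--     return lux
-- ===== Notes on version B (the rewrite author's own statement) =====
-- stated objective: alternative
-- what changed: Instead of filtering and scanning the whole lamp list for every query, B precomputes row/column/diagonal/anti-diagonal counters and a cell multiset once and answers each query by inclusion-exclusion over the 9 neighborhood cells.
-- outside the precondition, e.g. on illumination(1, [[5, 5]], [[1]]): A returns [False], B raises IndexError
import Mathlib
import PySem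

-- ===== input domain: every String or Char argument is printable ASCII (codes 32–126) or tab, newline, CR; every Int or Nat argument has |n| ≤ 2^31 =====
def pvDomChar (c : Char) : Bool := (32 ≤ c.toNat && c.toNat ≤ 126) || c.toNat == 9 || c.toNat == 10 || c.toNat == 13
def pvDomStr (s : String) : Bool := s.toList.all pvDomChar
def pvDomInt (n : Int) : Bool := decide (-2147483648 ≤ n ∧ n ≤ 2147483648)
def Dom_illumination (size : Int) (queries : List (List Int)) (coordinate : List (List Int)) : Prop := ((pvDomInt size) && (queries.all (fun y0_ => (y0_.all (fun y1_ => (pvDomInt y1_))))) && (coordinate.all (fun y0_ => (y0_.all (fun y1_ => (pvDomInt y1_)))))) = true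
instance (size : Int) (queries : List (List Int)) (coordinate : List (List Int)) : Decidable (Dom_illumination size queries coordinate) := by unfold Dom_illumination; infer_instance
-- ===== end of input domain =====

-- B replaces A's per-query scan of the whole lamp list by counters (rows/cols/diagonals/cells)
-- built once, answering each query by inclusion-exclusion over the 9 neighborhood cells.

-- shared accessor: Python's l[i]; total via default 0, Pre_ keeps every used index in range
def pvIx (l : List Int) (i : Int) : Int := PySem.List.pyGetD l i 0

-- ===== PORT A =====
def grid_check (n : Int) (lamp : List Int) : Bool :=
  if pvIx lamp 0 > n || pvIx lamp 1 > n then false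
  else if pvIx lamp 0 < 1 || pvIx lamp 1 < 1 then false
  else true

def diagonal (item : List Int) (lamp : List Int) : Bool :=
  if (pvIx item 0 - pvIx lamp 0).natAbs = (pvIx item 1 - pvIx lamp 1).natAbs then true else false

def row_cols (item : List Int) (lamp : List Int) : Bool :=
  if pvIx item 0 = pvIx lamp 0 then true
  else if pvIx item 1 = pvIx lamp 1 then true
  else false

def adjacent (coord_list : List (List Int)) (query : List Int) : List (List Int) :=
  coord_list.foldl (fun new_list coord =>
    if pvIx coord 0 = pvIx query 0 - 1 && pvIx coord 1 = pvIx query 1 - 1 then new_list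
    else if pvIx coord 0 = pvIx query 0 - 1 && pvIx coord 1 = pvIx query 1 then new_list
    else if pvIx coord 0 = pvIx query 0 - 1 && pvIx coord 1 = pvIx query 1 + 1 then new_list
    else if pvIx coord 0 = pvIx query 0 && pvIx coord 1 = pvIx query 1 - 1 then new_list
    else if pvIx coord 0 = pvIx query 0 && pvIx coord 1 = pvIx query 1 then new_list
    else if pvIx coord 0 = pvIx query 0 && pvIx coord 1 = pvIx query 1 + 1 then new_list
    else if pvIx coord 0 = pvIx query 0 + 1 && pvIx coord 1 = pvIx query 1 - 1 then new_list
    else if pvIx coord 0 = pvIx query 0 + 1 && pvIx coord 1 = pvIx query 1 then new_list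
    else if pvIx coord 0 = pvIx query 0 + 1 && pvIx coord 1 = pvIx query 1 + 1 then new_list
    else new_list ++ [coord]) []

-- the inner 'for item … if …: flag = True; break' loop of A
def scanFlag (coord_list : List (List Int)) (query : List Int) : Bool :=
  match coord_list with
  | [] => false
  | item :: rest =>
    if diagonal item query = true || row_cols item query = true then true
    else scanFlag rest query

def illumination (size : Int) (queries : List (List Int)) (coordinate : List (List Int)) : List Bool :=
  queries.foldl (fun lux query =>
    if grid_check size query = false then lux ++ [false]
    else if scanFlag (adjacent coordinate query) query = true then lux ++ [true]
    else lux ++ [false]) []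

-- ===== PORT B =====
-- the single pass over coordinate building the five counters of Source B
def altCounters (coordinate : List (List Int)) :
    PySem.Dict Int Int × PySem.Dict Int Int × PySem.Dict Int Int × PySem.Dict Int Int ×
      PySem.Dict (Int × Int) Int :=
  coordinate.foldl (fun s c =>
    let x := pvIx c 0
    let y := pvIx c 1
    (s.1.insert x (s.1.getD x 0 + 1),
     s.2.1.insert y (s.2.1.getD y 0 + 1),
     s.2.2.1.insert (x - y) (s.2.2.1.getD (x - y) 0 + 1),
     s.2.2.2.1.insert (x + y) (s.2.2.2.1.getD (x + y) 0 + 1),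
     s.2.2.2.2.insert (x, y) (s.2.2.2.2.getD (x, y) 0 + 1)))
    (.empty, .empty, .empty, .empty, .empty)

def illumination_alt (size : Int) (queries : List (List Int)) (coordinate : List (List Int)) : List Bool :=
  let s := altCounters coordinate
  queries.foldl (fun lux q =>
    let x := pvIx q 0
    let y := pvIx q 1
    if !(1 ≤ x && x ≤ size && 1 ≤ y && y ≤ size) then lux ++ [false]
    else
      let t0 := s.1.getD x 0 + s.2.1.getD y 0 + s.2.2.1.getD (x - y) 0 + s.2.2.2.1.getD (x + y) 0
                  - 4 * s.2.2.2.2.getD (x, y) 0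
      let t := [(-1 : Int), 0, 1].foldl (fun t dx =>
                 [(-1 : Int), 0, 1].foldl (fun t dy =>
                   if dx ≠ 0 ∨ dy ≠ 0 then t - s.2.2.2.2.getD (x + dx, y + dy) 0 else t) t) t0
      lux ++ [decide (t > 0)]) []

-- ===== PRECONDITION & SPEC =====
-- Pre_ excludes inner lists shorter than 2 elements: on a short query A raises IndexError, and on a
-- short coordinate A raises whenever some query lies inside the grid; in the remaining corner (short
-- coordinates but every query off-grid) A returns while B still raises IndexError (see cite).
def Pre_illumination (size : Int) (queries : List (List Int)) (coordinate : List (List Int)) : Prop :=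
  (∀ q ∈ queries, 2 ≤ q.length) ∧ (∀ c ∈ coordinate, 2 ≤ c.length)
instance (size : Int) (queries : List (List Int)) (coordinate : List (List Int)) : Decidable (Pre_illumination size queries coordinate) := by unfold Pre_illumination; infer_instance

def pvWitness_illumination : Int × List (List Int) × List (List Int) := (3, [[2, 2], [1, 3]], [[2, 4], [0, 0]])

def Spec_illumination (size : Int) (queries : List (List Int)) (coordinate : List (List Int)) (out : List Bool) : Prop := out = illumination_alt size queries coordinate
instance (size : Int) (queries : List (List Int)) (coordinate : List (List Int)) (out : List Bool) : Decidable (Spec_illumination size queries coordinate out) := by unfold Spec_illumination; infer_instance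

-- ===== CLAIM (what is proved, stated in full; the proofs are below) =====
def Claim_equal_illumination : Prop := ∀ (size : Int) (queries : List (List Int)) (coordinate : List (List Int)), Dom_illumination size queries coordinate → Pre_illumination size queries coordinate → Spec_illumination size queries coordinate (illumination size queries coordinate)

-- ===== LEMMAS AND PROOFS =====

-- abbreviations used only by the proofs
def nearB (qx qy : Int) (c : List Int) : Bool :=
  (qx - 1 ≤ pvIx c 0 && pvIx c 0 ≤ qx + 1) && (qy - 1 ≤ pvIx c 1 && pvIx c 1 ≤ qy + 1)

def lineB (qx qy : Int) (c : List Int) : Bool :=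
  (pvIx c 0 == qx) || (pvIx c 1 == qy) || ((pvIx c 0 - qx).natAbs == (pvIx c 1 - qy).natAbs)

def goodB (qx qy : Int) (c : List Int) : Bool := !nearB qx qy c && lineB qx qy c

-- adjacent is a filter by "not in the 3x3 neighborhood"
lemma adjacent_step (q : List Int) (nl : List (List Int)) (c : List Int) :
    (if pvIx c 0 = pvIx q 0 - 1 && pvIx c 1 = pvIx q 1 - 1 then nl
    else if pvIx c 0 = pvIx q 0 - 1 && pvIx c 1 = pvIx q 1 then nl
    else if pvIx c 0 = pvIx q 0 - 1 && pvIx c 1 = pvIx q 1 + 1 then nl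
    else if pvIx c 0 = pvIx q 0 && pvIx c 1 = pvIx q 1 - 1 then nl
    else if pvIx c 0 = pvIx q 0 && pvIx c 1 = pvIx q 1 then nl
    else if pvIx c 0 = pvIx q 0 && pvIx c 1 = pvIx q 1 + 1 then nl
    else if pvIx c 0 = pvIx q 0 + 1 && pvIx c 1 = pvIx q 1 - 1 then nl
    else if pvIx c 0 = pvIx q 0 + 1 && pvIx c 1 = pvIx q 1 then nl
    else if pvIx c 0 = pvIx q 0 + 1 && pvIx c 1 = pvIx q 1 + 1 then nl
    else nl ++ [c]) = if !nearB (pvIx q 0) (pvIx q 1) c then nl ++ [c] else nl := by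
  simp only [nearB, Bool.and_eq_true, decide_eq_true_eq, Bool.not_and]
  split_ifs <;> simp_all <;> omega

lemma adjacent_aux (q : List Int) (l : List (List Int)) : ∀ acc : List (List Int),
    l.foldl (fun new_list coord =>
      if pvIx coord 0 = pvIx q 0 - 1 && pvIx coord 1 = pvIx q 1 - 1 then new_list
      else if pvIx coord 0 = pvIx q 0 - 1 && pvIx coord 1 = pvIx q 1 then new_list
      else if pvIx coord 0 = pvIx q 0 - 1 && pvIx coord 1 = pvIx q 1 + 1 then new_list
      else if pvIx coord 0 = pvIx q 0 && pvIx coord 1 = pvIx q 1 - 1 then new_list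
      else if pvIx coord 0 = pvIx q 0 && pvIx coord 1 = pvIx q 1 then new_list
      else if pvIx coord 0 = pvIx q 0 && pvIx coord 1 = pvIx q 1 + 1 then new_list
      else if pvIx coord 0 = pvIx q 0 + 1 && pvIx coord 1 = pvIx q 1 - 1 then new_list
      else if pvIx coord 0 = pvIx q 0 + 1 && pvIx coord 1 = pvIx q 1 then new_list
      else if pvIx coord 0 = pvIx q 0 + 1 && pvIx coord 1 = pvIx q 1 + 1 then new_list
      else new_list ++ [coord]) acc
    = acc ++ l.filter (fun c => !nearB (pvIx q 0) (pvIx q 1) c) := by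
  induction l with
  | nil => simp
  | cons c t ih =>
    intro acc
    rw [List.foldl_cons, adjacent_step q acc c]
    by_cases h : nearB (pvIx q 0) (pvIx q 1) c
    · rw [if_neg (by simp [h]), ih, List.filter_cons_of_neg (by simp [h])]
    · rw [if_pos (by simp [h]), ih, List.filter_cons_of_pos (by simp [h])]
      simp

lemma adjacent_eq_filter (l : List (List Int)) (q : List Int) :
    adjacent l q = l.filter (fun c => !nearB (pvIx q 0) (pvIx q 1) c) := by
  exact (adjacent_aux q l []).trans (List.nil_append _)

lemma scanFlag_eq_any (l : List (List Int)) (q : List Int) :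
    scanFlag l q = l.any (fun item => diagonal item q || row_cols item q) := by
  induction l with
  | nil => rfl
  | cons c t ih => by_cases h : diagonal c q = true || row_cols c q = true <;>
      simp [scanFlag, ih]

lemma diag_row_eq_line (q c : List Int) :
    (diagonal c q || row_cols c q) = lineB (pvIx q 0) (pvIx q 1) c := by
  simp only [diagonal, row_cols, lineB]
  split_ifs <;> simp_all

-- the five counter components are counter folds over the projected key lists
lemma altCounters_eq (l : List (List Int)) :
    altCounters l =
      ((l.map (fun c => pvIx c 0)).foldl (fun d x => d.insert x (d.getD x 0 + 1)) .empty,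
       (l.map (fun c => pvIx c 1)).foldl (fun d x => d.insert x (d.getD x 0 + 1)) .empty,
       (l.map (fun c => pvIx c 0 - pvIx c 1)).foldl (fun d x => d.insert x (d.getD x 0 + 1)) .empty,
       (l.map (fun c => pvIx c 0 + pvIx c 1)).foldl (fun d x => d.insert x (d.getD x 0 + 1)) .empty,
       (l.map (fun c => (pvIx c 0, pvIx c 1))).foldl (fun d x => d.insert x (d.getD x 0 + 1)) .empty) := by
  suffices h : ∀ (l : List (List Int)) (r c d a : PySem.Dict Int Int)
      (e : PySem.Dict (Int × Int) Int),
      l.foldl (fun s c =>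
        let x := pvIx c 0
        let y := pvIx c 1
        (s.1.insert x (s.1.getD x 0 + 1),
         s.2.1.insert y (s.2.1.getD y 0 + 1),
         s.2.2.1.insert (x - y) (s.2.2.1.getD (x - y) 0 + 1),
         s.2.2.2.1.insert (x + y) (s.2.2.2.1.getD (x + y) 0 + 1),
         s.2.2.2.2.insert (x, y) (s.2.2.2.2.getD (x, y) 0 + 1))) (r, c, d, a, e)
      = ((l.map (fun c => pvIx c 0)).foldl (fun d x => d.insert x (d.getD x 0 + 1)) r,
         (l.map (fun c => pvIx c 1)).foldl (fun d x => d.insert x (d.getD x 0 + 1)) c,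
         (l.map (fun c => pvIx c 0 - pvIx c 1)).foldl (fun d x => d.insert x (d.getD x 0 + 1)) d,
         (l.map (fun c => pvIx c 0 + pvIx c 1)).foldl (fun d x => d.insert x (d.getD x 0 + 1)) a,
         (l.map (fun c => (pvIx c 0, pvIx c 1))).foldl (fun d x => d.insert x (d.getD x 0 + 1)) e) by
    exact h l _ _ _ _ _
  intro l
  induction l with
  | nil => intro r c d a e; rfl
  | cons c0 t ih =>
    intro r c d a e
    rw [List.foldl_cons]
    simp only [List.map_cons, List.foldl_cons]
    exact ih _ _ _ _ _

-- counts as Int sums of 0/1 indicators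
lemma count_map_ix {β : Type} [BEq β] [LawfulBEq β] [DecidableEq β] (f : List Int → β) (l : List (List Int)) (v : β) :
    (↑(List.count v (l.map f)) : Int) = (l.map (fun c => if f c = v then (1 : Int) else 0)).sum := by
  induction l with
  | nil => rfl
  | cons c t ih =>
    simp only [List.map_cons, List.count_cons, List.sum_cons]
    by_cases h : f c = v <;> simp [h] <;> omega

-- the pointwise inclusion-exclusion identity
lemma point_weight (qx qy : Int) (c : List Int) :
    (if pvIx c 0 = qx then (1 : Int) else 0) + (if pvIx c 1 = qy then 1 else 0)
      + (if pvIx c 0 - pvIx c 1 = qx - qy then 1 else 0)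
      + (if pvIx c 0 + pvIx c 1 = qx + qy then 1 else 0)
      - 4 * (if (pvIx c 0, pvIx c 1) = (qx, qy) then 1 else 0)
      - ((if (pvIx c 0, pvIx c 1) = (qx - 1, qy - 1) then (1 : Int) else 0)
        + (if (pvIx c 0, pvIx c 1) = (qx - 1, qy) then 1 else 0)
        + (if (pvIx c 0, pvIx c 1) = (qx - 1, qy + 1) then 1 else 0)
        + (if (pvIx c 0, pvIx c 1) = (qx, qy - 1) then 1 else 0)
        + (if (pvIx c 0, pvIx c 1) = (qx, qy + 1) then 1 else 0)
        + (if (pvIx c 0, pvIx c 1) = (qx + 1, qy - 1) then 1 else 0)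
        + (if (pvIx c 0, pvIx c 1) = (qx + 1, qy) then 1 else 0)
        + (if (pvIx c 0, pvIx c 1) = (qx + 1, qy + 1) then 1 else 0))
    = if goodB qx qy c then 1 else 0 := by
  have hrow : ∀ a b x y : Int,
      (if a = x ∧ b = y - 1 then (1 : Int) else 0) + (if a = x ∧ b = y then 1 else 0)
        + (if a = x ∧ b = y + 1 then 1 else 0)
      = if a = x ∧ (y - 1 ≤ b ∧ b ≤ y + 1) then 1 else 0 := by
    intro a b x y; split_ifs <;> omega
  have hcomb : ∀ a b x y : Int,
      (if a = x - 1 ∧ (y - 1 ≤ b ∧ b ≤ y + 1) then (1 : Int) else 0)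
        + (if a = x ∧ (y - 1 ≤ b ∧ b ≤ y + 1) then 1 else 0)
        + (if a = x + 1 ∧ (y - 1 ≤ b ∧ b ≤ y + 1) then 1 else 0)
      = if (x - 1 ≤ a ∧ a ≤ x + 1) ∧ (y - 1 ≤ b ∧ b ≤ y + 1) then 1 else 0 := by
    intro a b x y; split_ifs <;> omega
  have h2 :
      (if pvIx c 0 = qx then (1 : Int) else 0) + (if pvIx c 1 = qy then 1 else 0)
        + (if pvIx c 0 - pvIx c 1 = qx - qy then 1 else 0)
        + (if pvIx c 0 + pvIx c 1 = qx + qy then 1 else 0)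
        - 3 * (if pvIx c 0 = qx ∧ pvIx c 1 = qy then 1 else 0)
        - (if (qx - 1 ≤ pvIx c 0 ∧ pvIx c 0 ≤ qx + 1) ∧ (qy - 1 ≤ pvIx c 1 ∧ pvIx c 1 ≤ qy + 1)
            then 1 else 0)
      = if goodB qx qy c then 1 else 0 := by
    simp only [goodB, nearB, lineB, Bool.and_eq_true, Bool.or_eq_true, Bool.not_eq_true',
      Bool.and_eq_false_iff, decide_eq_false_iff_not, beq_iff_eq]
    split_ifs <;> omega
  simp only [Prod.mk.injEq]
  linear_combination h2 - hcomb (pvIx c 0) (pvIx c 1) qx qy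
    - hrow (pvIx c 0) (pvIx c 1) (qx - 1) qy - hrow (pvIx c 0) (pvIx c 1) qx qy
    - hrow (pvIx c 0) (pvIx c 1) (qx + 1) qy

-- B's total for an in-grid query counts exactly the good lamps
lemma total_eq_count (l : List (List Int)) (qx qy : Int) :
    ((altCounters l).1.getD qx 0 + (altCounters l).2.1.getD qy 0
      + (altCounters l).2.2.1.getD (qx - qy) 0 + (altCounters l).2.2.2.1.getD (qx + qy) 0
      - 4 * (altCounters l).2.2.2.2.getD (qx, qy) 0)
      - ((altCounters l).2.2.2.2.getD (qx - 1, qy - 1) 0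
        + (altCounters l).2.2.2.2.getD (qx - 1, qy) 0
        + (altCounters l).2.2.2.2.getD (qx - 1, qy + 1) 0
        + (altCounters l).2.2.2.2.getD (qx, qy - 1) 0
        + (altCounters l).2.2.2.2.getD (qx, qy + 1) 0
        + (altCounters l).2.2.2.2.getD (qx + 1, qy - 1) 0
        + (altCounters l).2.2.2.2.getD (qx + 1, qy) 0
        + (altCounters l).2.2.2.2.getD (qx + 1, qy + 1) 0)
    = ↑(l.countP (goodB qx qy)) := by
  rw [altCounters_eq]
  simp only [PySem.Dict.getD_foldl_insert_add_one, PySem.Dict.getD_empty, zero_add]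
  rw [count_map_ix, count_map_ix, count_map_ix, count_map_ix, count_map_ix, count_map_ix,
    count_map_ix, count_map_ix, count_map_ix, count_map_ix, count_map_ix, count_map_ix,
    count_map_ix]
  induction l with
  | nil => simp
  | cons c t ih =>
    simp only [List.map_cons, List.sum_cons, List.countP_cons]
    have hp := point_weight qx qy c
    by_cases hg : goodB qx qy c = true
    · rw [if_pos hg] at hp
      push_cast
      rw [if_pos hg]
      linarith [hp, ih]
    · rw [if_neg hg] at hp
      push_cast
      rw [if_neg hg]
      linarith [hp, ih]

-- per-query values of the two loops
def elemA (size : Int) (coordinate : List (List Int)) (q : List Int) : Bool :=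
  if grid_check size q = false then false
  else if scanFlag (adjacent coordinate q) q = true then true
  else false

def elemB (size : Int) (coordinate : List (List Int)) (q : List Int) : Bool :=
  let s := altCounters coordinate
  let x := pvIx q 0
  let y := pvIx q 1
  if !(1 ≤ x && x ≤ size && 1 ≤ y && y ≤ size) then false
  else
    let t0 := s.1.getD x 0 + s.2.1.getD y 0 + s.2.2.1.getD (x - y) 0 + s.2.2.2.1.getD (x + y) 0
                - 4 * s.2.2.2.2.getD (x, y) 0
    let t := [(-1 : Int), 0, 1].foldl (fun t dx =>
               [(-1 : Int), 0, 1].foldl (fun t dy =>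
                 if dx ≠ 0 ∨ dy ≠ 0 then t - s.2.2.2.2.getD (x + dx, y + dy) 0 else t) t) t0
    decide (t > 0)

lemma loopA (size : Int) (coordinate : List (List Int)) (l : List (List Int)) :
    ∀ acc : List Bool,
      l.foldl (fun lux query =>
        if grid_check size query = false then lux ++ [false]
        else if scanFlag (adjacent coordinate query) query = true then lux ++ [true]
        else lux ++ [false]) acc
      = acc ++ l.map (elemA size coordinate) := by
  induction l with
  | nil => simp
  | cons q t ih =>
    intro acc
    rw [List.foldl_cons]
    have hstep : (if grid_check size q = false then acc ++ [false]
        else if scanFlag (adjacent coordinate q) q = true then acc ++ [true]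
        else acc ++ [false]) = acc ++ [elemA size coordinate q] := by
      unfold elemA; split_ifs <;> rfl
    rw [hstep, ih, List.map_cons]
    simp

lemma loopB (size : Int) (coordinate : List (List Int)) (l : List (List Int)) :
    ∀ acc : List Bool,
      l.foldl (fun lux q =>
        let x := pvIx q 0
        let y := pvIx q 1
        if !(1 ≤ x && x ≤ size && 1 ≤ y && y ≤ size) then lux ++ [false]
        else
          let t0 := (altCounters coordinate).1.getD x 0 + (altCounters coordinate).2.1.getD y 0
                      + (altCounters coordinate).2.2.1.getD (x - y) 0
                      + (altCounters coordinate).2.2.2.1.getD (x + y) 0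
                      - 4 * (altCounters coordinate).2.2.2.2.getD (x, y) 0
          let t := [(-1 : Int), 0, 1].foldl (fun t dx =>
                     [(-1 : Int), 0, 1].foldl (fun t dy =>
                       if dx ≠ 0 ∨ dy ≠ 0 then t - (altCounters coordinate).2.2.2.2.getD (x + dx, y + dy) 0
                       else t) t) t0
          lux ++ [decide (t > 0)]) acc
      = acc ++ l.map (elemB size coordinate) := by
  induction l with
  | nil => simp
  | cons q t ih =>
    intro acc
    rw [List.foldl_cons, ih, List.map_cons]
    unfold elemB
    dsimp only
    split_ifs <;> simp

lemma elem_eq (size : Int) (coordinate : List (List Int)) (q : List Int) :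
    elemA size coordinate q = elemB size coordinate q := by
  unfold elemA elemB
  dsimp only
  by_cases hb : 1 ≤ pvIx q 0 ∧ pvIx q 0 ≤ size ∧ 1 ≤ pvIx q 1 ∧ pvIx q 1 ≤ size
  · have hgc : grid_check size q = true := by
      simp only [grid_check, Bool.or_eq_true, decide_eq_true_eq]
      split_ifs <;> first | rfl | (exfalso; omega)
    have h1 : ¬ (grid_check size q = false) := by simp [hgc]
    have h2 : ¬ ((!(decide (1 ≤ pvIx q 0) && decide (pvIx q 0 ≤ size)
        && decide (1 ≤ pvIx q 1) && decide (pvIx q 1 ≤ size))) = true) := by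
      simp [hb.1, hb.2.1, hb.2.2.1, hb.2.2.2]
    rw [if_neg h1, if_neg h2]
    have hsf : (if scanFlag (adjacent coordinate q) q = true then true else false)
        = scanFlag (adjacent coordinate q) q := by
      by_cases h : scanFlag (adjacent coordinate q) q = true <;> simp [h]
    rw [hsf, scanFlag_eq_any, adjacent_eq_filter, List.any_filter]
    have hfun : (fun a => (!nearB (pvIx q 0) (pvIx q 1) a) && (diagonal a q || row_cols a q))
        = goodB (pvIx q 0) (pvIx q 1) := funext fun a => by
      rw [diag_row_eq_line]; rfl
    rw [hfun]
    have h := total_eq_count coordinate (pvIx q 0) (pvIx q 1)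
    simp only [List.foldl_cons, List.foldl_nil]
    norm_num
    rw [Bool.eq_iff_iff]
    simp only [List.any_eq_true, decide_eq_true_eq]
    rw [← List.countP_pos_iff]
    ring_nf at h ⊢
    constructor
    · intro hc
      have hc' : (0 : Int) < ↑(coordinate.countP (goodB (pvIx q 0) (pvIx q 1))) := by
        exact_mod_cast hc
      linarith [h]
    · intro hc
      have hc' : (0 : Int) < ↑(coordinate.countP (goodB (pvIx q 0) (pvIx q 1))) := by
        linarith [h]
      exact_mod_cast hc'
  · have hgc : grid_check size q = false := by
      simp only [grid_check, Bool.or_eq_true, decide_eq_true_eq]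
      split_ifs <;> first | rfl | (exfalso; omega)
    have h2 : (!(decide (1 ≤ pvIx q 0) && decide (pvIx q 0 ≤ size)
        && decide (1 ≤ pvIx q 1) && decide (pvIx q 1 ≤ size))) = true := by
      simp only [Bool.not_eq_true', Bool.and_eq_false_iff, decide_eq_false_iff_not, not_le]
      omega
    rw [if_pos hgc, if_pos h2]

theorem illumination_spec : Claim_equal_illumination := by
  intro size queries coordinate hdom hpre
  unfold Spec_illumination illumination illumination_alt
  rw [loopA size coordinate queries [], loopB size coordinate queries []]
  simp only [List.nil_append]
  exact List.map_congr_left fun q _ => elem_eq size coordinate q
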